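-- pv_equiv track=rewrite | github.com/no-identd/constrained-writer | autosuggest.py | bigramSuggest
-- ===== SOURCE A (Python) =====
-- def bigramSuggest(world, word, invert=False):
-- 	""" world format: { word1 : { word2 : count } }
-- 	"""
-- 	ret=[]
-- 	word=word.lower()
-- 	if(word in world):
-- 		items=world[word]
-- 		invertedList={}
-- 		vals=[]
-- 		for item in items.keys():
-- 			vals.append(items[item])
-- 			if (not (items[item] in invertedList)):
-- 				invertedList[items[item]]=[]
-- 			invertedList[items[item]].append(item)
-- 		vals=list(set(vals))
-- 		vals.sort()
-- 		for val in vals: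
-- 			ret.extend(invertedList[val])
-- 	if(invert):
-- 		ret.reverse()
-- 	return ret
-- ===== SOURCE B (Python) =====
-- def bigramSuggest(world, word, invert=False):
--     """ world format: { word1 : { word2 : count } } """
--     word = word.lower()
--     if word in world:
--         items = world[word]
--         ret = sorted(items, key=items.get)
--     else:
--         ret = []
--     if invert:
--         ret.reverse()
--     return ret
-- ===== Notes on version B (the rewrite author's own statement) =====
-- stated objective: simpler
-- what changed: Replaces A's inverted count-to-words dictionary, set dedup and per-count bucket concatenation with a single stable sort of the successor words keyed by their count, which yields the same ascending order with ties kept in dict order.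
import Mathlib
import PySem

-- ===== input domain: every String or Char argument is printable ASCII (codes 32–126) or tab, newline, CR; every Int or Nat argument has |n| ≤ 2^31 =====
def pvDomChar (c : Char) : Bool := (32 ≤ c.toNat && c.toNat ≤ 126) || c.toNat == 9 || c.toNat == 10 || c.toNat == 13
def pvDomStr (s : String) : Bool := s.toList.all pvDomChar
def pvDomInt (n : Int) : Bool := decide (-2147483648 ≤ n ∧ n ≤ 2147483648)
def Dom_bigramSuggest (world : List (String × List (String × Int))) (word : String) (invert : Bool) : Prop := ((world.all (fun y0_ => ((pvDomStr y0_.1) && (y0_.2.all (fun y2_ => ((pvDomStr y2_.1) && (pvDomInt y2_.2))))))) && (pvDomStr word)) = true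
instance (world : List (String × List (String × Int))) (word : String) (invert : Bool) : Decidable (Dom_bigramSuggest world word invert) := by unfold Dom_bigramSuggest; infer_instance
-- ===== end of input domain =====

-- B replaces A's inverted count→words dictionary, set dedup and per-count bucket
-- concatenation with one stable sort of the successor words keyed by their count (objective: simpler).

-- ===== PORT A =====
def bigramSuggest (world : List (String × List (String × Int))) (word : String) (invert : Bool) : List String :=
  let word := PySem.Str.lower word
  let w := PySem.Dict.ofList world
  let ret : List String :=
    match w.get? word with
    | none => []
    | some itemsL =>
      let items : PySem.Dict String Int := PySem.Dict.ofList itemsL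
      -- for item in items.keys(): vals.append(items[item]); group item under items[item]
      -- (items[item] is ported as (items.get? item).getD 0: item ranges over items.keys,
      --  so the lookup always succeeds and the default is never used)
      let st :=
        items.keys.foldl (fun (st : List Int × PySem.Dict Int (List String)) item =>
          let v := (items.get? item).getD 0
          let vals := st.1 ++ [v]
          let inv := if st.2.contains v then st.2 else st.2.insert v []
          (vals, inv.modify v [] (fun l => l ++ [item]))) ([], PySem.Dict.empty)
      -- vals = list(set(vals)); vals.sort()  (set iteration order is erased by the sort)
      let vals := PySem.List.sorted (PySem.Set.ofList st.1) (fun x => x) false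
      -- for val in vals: ret.extend(invertedList[val])
      vals.foldl (fun ret v => ret ++ st.2.getD v []) []
  if invert then ret.reverse else ret

-- ===== PORT B =====
def bigramSuggest_alt (world : List (String × List (String × Int))) (word : String) (invert : Bool) : List String :=
  let word := PySem.Str.lower word
  let w := PySem.Dict.ofList world
  let ret : List String :=
    match w.get? word with
    | some itemsL =>
      let items : PySem.Dict String Int := PySem.Dict.ofList itemsL
      -- ret = sorted(items, key=items.get)  (every sorted element is a key of items,
      --  so items.get never yields None; ported as (items.get? k).getD 0)
      PySem.List.sorted items.keys (fun k => (items.get? k).getD 0) false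
    | none => []
  if invert then ret.reverse else ret

-- ===== PRECONDITION & SPEC =====
def Spec_bigramSuggest (world : List (String × List (String × Int))) (word : String) (invert : Bool) (out : List String) : Prop := out = bigramSuggest_alt world word invert
instance (world : List (String × List (String × Int))) (word : String) (invert : Bool) (out : List String) : Decidable (Spec_bigramSuggest world word invert out) := by unfold Spec_bigramSuggest; infer_instance

-- ===== CLAIM (what is proved, stated in full; the proofs are below) =====
def Claim_equal_bigramSuggest : Prop := ∀ (world : List (String × List (String × Int))) (word : String) (invert : Bool), Dom_bigramSuggest world word invert → Spec_bigramSuggest world word invert (bigramSuggest world word invert)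

-- ===== LEMMAS AND PROOFS =====

-- insertBy skips a prefix it is not ordered before
theorem insertBy_append_left {α : Type} (before : α → α → Bool) (x : α) (L1 L2 : List α)
    (h : ∀ y ∈ L1, before x y = false) :
    PySem.List.insertBy before x (L1 ++ L2) = L1 ++ PySem.List.insertBy before x L2 := by
  induction L1 with
  | nil => simp
  | cons y ys ih =>
    have hy : before x y = false := h y (List.mem_cons_self)
    simp [PySem.List.insertBy, hy, ih (fun z hz => h z (List.mem_cons_of_mem _ hz))]

theorem insertBy_all_true {α : Type} (before : α → α → Bool) (x : α) (L : List α)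
    (h : ∀ y ∈ L, before x y = true) :
    PySem.List.insertBy before x L = x :: L := by
  cases L with
  | nil => rfl
  | cons y ys => simp [PySem.List.insertBy, h y (List.mem_cons_self)]

theorem flatMap_congr_mem {α β : Type} (L : List α) (f g : α → List β)
    (h : ∀ v ∈ L, f v = g v) : L.flatMap f = L.flatMap g := by
  induction L with
  | nil => rfl
  | cons v vs ih =>
    simp [List.flatMap_cons, h v (List.mem_cons_self), ih (fun z hz => h z (List.mem_cons_of_mem _ hz))]

-- a strictly increasing list is its three-way split at k
theorem split3 (k : Int) (V : List Int) (hp : V.Pairwise (· < ·)) :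
    V = V.filter (fun v => decide (v < k)) ++ V.filter (fun v => v == k)
        ++ V.filter (fun v => decide (k < v)) := by
  induction V with
  | nil => rfl
  | cons h t ih =>
    rw [List.pairwise_cons] at hp
    rcases lt_trichotomy h k with hc | hc | hc
    · have h2 : (h == k) = false := by simp [ne_of_lt hc]
      have h3 : decide (k < h) = false := by simp [not_lt.2 hc.le]
      simp only [List.filter_cons, decide_eq_true hc, h2, h3, if_true, Bool.false_eq_true, if_false]
      simp only [List.cons_append]
      exact congrArg _ (ih hp.2)
    · subst hc
      have h1 : t.filter (fun v => decide (v < h)) = [] :=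
        List.filter_eq_nil_iff.2 (fun v hv => by simp [not_lt.2 (le_of_lt (hp.1 v hv))])
      have h2 : t.filter (fun v => v == h) = [] :=
        List.filter_eq_nil_iff.2 (fun v hv => by simp [(ne_of_gt (hp.1 v hv))])
      have h3 : t.filter (fun v => decide (h < v)) = t :=
        List.filter_eq_self.2 (fun v hv => by simp [hp.1 v hv])
      simp [h1, h2, h3]
    · have h1 : ∀ v ∈ h :: t, ¬ (v < k) := by
        intro v hv; rcases List.mem_cons.1 hv with rfl | hv
        · exact not_lt.2 (le_of_lt hc)
        · exact not_lt.2 (le_of_lt (lt_trans hc (hp.1 v hv)))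
      have h2 : ∀ v ∈ h :: t, ¬ (v = k) := by
        intro v hv; rcases List.mem_cons.1 hv with rfl | hv
        · exact ne_of_gt hc
        · exact ne_of_gt (lt_trans hc (hp.1 v hv))
      have h3 : ∀ v ∈ h :: t, k < v := by
        intro v hv; rcases List.mem_cons.1 hv with rfl | hv
        · exact hc
        · exact lt_trans hc (hp.1 v hv)
      rw [List.filter_eq_nil_iff.2 (fun v hv => by simp [h1 v hv]),
          List.filter_eq_nil_iff.2 (fun v hv => by simp [h2 v hv]),
          List.filter_eq_self.2 (fun v hv => by simp [h3 v hv])]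
      rfl

-- a nonempty duplicate-free list whose elements all equal k is [k]
theorem eq_singleton_of_all_eq (k : Int) (C : List Int) (hne : C ≠ [])
    (hall : ∀ v ∈ C, v = k) (hnd : C.Nodup) : C = [k] := by
  cases C with
  | nil => exact absurd rfl hne
  | cons c cs =>
    have hc : c = k := hall c (List.mem_cons_self)
    cases cs with
    | nil => rw [hc]
    | cons d ds =>
      have hd : d = k := hall d (List.mem_cons_of_mem _ (List.mem_cons_self))
      exfalso
      exact (List.nodup_cons.1 hnd).1 (by rw [hc, ← hd]; exact List.mem_cons_self)

-- STABILITY: Python's stable sort by key equals concatenating, per distinct key value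
-- in increasing order, the elements with that key in original order.
theorem stable_bucket (key : String → Int) (xs : List String) :
    PySem.List.sorted xs key false
      = (PySem.List.sorted (PySem.Set.ofList (xs.map key)) (fun v => v) false).flatMap
          (fun v => xs.filter (fun x => key x == v)) := by
  induction xs using List.reverseRecOn with
  | nil => rfl
  | append_singleton xs x ih =>
    have hfold : PySem.List.sorted (xs ++ [x]) key false
        = PySem.List.insertBy (fun a b => decide (key a < key b)) x
            (PySem.List.sorted xs key false) := by
      rw [PySem.List.sorted_eq_foldl_insertBy, PySem.List.sorted_eq_foldl_insertBy,
        List.foldl_append]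
      rfl
    set k := key x with hk
    set V := PySem.List.sorted (PySem.Set.ofList (xs.map key)) (fun v => v) false with hV
    have hVp : V.Pairwise (· < ·) := PySem.List.sorted_ofList_pairwise_lt _
    have hVnd : V.Nodup := ((PySem.List.sorted_perm _ _ _).nodup_iff).2 (PySem.Set.nodup_ofList _)
    have hVmem : ∀ v, v ∈ V ↔ v ∈ xs.map key := fun v => by
      rw [hV, PySem.List.mem_sorted, PySem.Set.mem_ofList]
    set A := V.filter (fun v => decide (v < k)) with hA
    set C := V.filter (fun v => v == k) with hC
    set B := V.filter (fun v => decide (k < v)) with hB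
    have hsplit : V = A ++ C ++ B := split3 k V hVp
    have hmemA : ∀ v ∈ A, v < k := fun v hv => by
      have := (List.mem_filter.1 hv).2; simpa using this
    have hmemC : ∀ v ∈ C, v = k := fun v hv => by
      have := (List.mem_filter.1 hv).2; simpa using this
    have hmemB : ∀ v ∈ B, k < v := fun v hv => by
      have := (List.mem_filter.1 hv).2; simpa using this
    have hkeyf : ∀ (L : List Int) (y : String),
        y ∈ L.flatMap (fun v => xs.filter (fun z => key z == v)) → key y ∈ L := by
      intro L y hy
      obtain ⟨v, hvL, hyf⟩ := List.mem_flatMap.1 hy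
      have : key y = v := by simpa using (List.mem_filter.1 hyf).2
      rw [this]; exact hvL
    -- LHS = fA ++ (fC ++ x :: fB)
    have hLHS : PySem.List.sorted (xs ++ [x]) key false
        = A.flatMap (fun v => xs.filter (fun z => key z == v))
          ++ (C.flatMap (fun v => xs.filter (fun z => key z == v))
          ++ x :: B.flatMap (fun v => xs.filter (fun z => key z == v))) := by
      rw [hfold, ih, hsplit, List.flatMap_append, List.flatMap_append, List.append_assoc]
      rw [insertBy_append_left _ x _ _ (fun y hy => by
        simpa using not_lt.2 (le_of_lt (hmemA _ (hkeyf A y hy))))]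
      rw [insertBy_append_left _ x _ _ (fun y hy => by
        simpa using not_lt.2 (le_of_eq (hmemC _ (hkeyf C y hy))))]
      rw [insertBy_all_true _ x _ (fun y hy => by
        simpa using hmemB _ (hkeyf B y hy))]
    rw [hLHS]
    have hof : PySem.Set.ofList ((xs ++ [x]).map key)
        = PySem.Set.add (PySem.Set.ofList (xs.map key)) k := by
      rw [List.map_append, PySem.Set.ofList_eq_foldl, PySem.Set.ofList_eq_foldl,
        List.foldl_append]
      rfl
    have hbucket' : ∀ v, (xs ++ [x]).filter (fun z => key z == v)
        = xs.filter (fun z => key z == v) ++ if k == v then [x] else [] := by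
      intro v
      rw [List.filter_append, hk]
      cases h : (key x == v) <;> simp [h]
    by_cases hmem : k ∈ xs.map key
    · -- k already a value: the sorted value set is unchanged, x joins its bucket
      have hadd : PySem.Set.add (PySem.Set.ofList (xs.map key)) k
          = PySem.Set.ofList (xs.map key) := by
        have hcon : (PySem.Set.ofList (xs.map key)).contains k = true := by
          rw [PySem.Set.contains_iff, PySem.Set.mem_ofList]
          exact hmem
        unfold PySem.Set.add
        rw [hcon]
        simp
      have hCk : C = [k] := by
        apply eq_singleton_of_all_eq k C ?_ hmemC (hVnd.filter _)
        exact List.ne_nil_of_mem (List.mem_filter.2 ⟨(hVmem k).2 hmem, by simp⟩)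
      rw [hof, hadd, ← hV, hsplit, List.flatMap_append, List.flatMap_append]
      rw [flatMap_congr_mem A (fun v => (xs ++ [x]).filter (fun z => key z == v)) (fun v => xs.filter (fun z => key z == v))
          (fun v hv => by
            show (xs ++ [x]).filter (fun z => key z == v) = xs.filter (fun z => key z == v)
            rw [hbucket' v]; simp [ne_of_gt (hmemA v hv)]),
        flatMap_congr_mem B (fun v => (xs ++ [x]).filter (fun z => key z == v)) (fun v => xs.filter (fun z => key z == v))
          (fun v hv => by
            show (xs ++ [x]).filter (fun z => key z == v) = xs.filter (fun z => key z == v)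
            rw [hbucket' v]; simp [ne_of_lt (hmemB v hv)])]
      rw [hCk]
      simp [hbucket']
    · -- k is a new value: it is inserted between A and B, with bucket [x]
      have hCnil : C = [] := by
        rw [hC]
        refine List.filter_eq_nil_iff.2 (fun v hv => ?_)
        have : v ≠ k := fun h => hmem (h ▸ (hVmem v).1 hv)
        simp [this]
      have hadd : PySem.Set.add (PySem.Set.ofList (xs.map key)) k
          = PySem.Set.ofList (xs.map key) ++ [k] := by
        have hcon : (PySem.Set.ofList (xs.map key)).contains k = false := by
          rw [Bool.eq_false_iff, Ne, PySem.Set.contains_iff, PySem.Set.mem_ofList]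
          exact hmem
        unfold PySem.Set.add
        rw [hcon]
        simp
      have hAB : V = A ++ B := by rw [hsplit, hCnil]; simp
      have hperm : (A ++ k :: B).Perm (PySem.Set.ofList (xs.map key) ++ [k]) := by
        refine List.perm_middle.trans ?_
        have h1 : (A ++ B).Perm (PySem.Set.ofList (xs.map key)) := by
          rw [← hAB]; rw [hV]; exact PySem.List.sorted_perm _ _ _
        exact (h1.cons k).trans (List.perm_append_singleton k _).symm
      have hpw : (A ++ k :: B).Pairwise (fun a b => a < b) := by
        rw [List.pairwise_append]
        refine ⟨List.Pairwise.sublist List.filter_sublist hVp, ?_, ?_⟩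
        · rw [List.pairwise_cons]
          exact ⟨fun b hb => hmemB b hb, List.Pairwise.sublist List.filter_sublist hVp⟩
        · intro a ha b hb
          rcases List.mem_cons.1 hb with rfl | hb
          · exact hmemA a ha
          · exact lt_trans (hmemA a ha) (hmemB b hb)
      have hsorted' : PySem.List.sorted (PySem.Set.ofList (xs.map key) ++ [k])
          (fun v => v) false = A ++ k :: B :=
        PySem.List.sorted_eq_of_perm_of_pairwise_lt _ _ _ hperm hpw
      rw [hof, hadd, hsorted', List.flatMap_append, List.flatMap_cons]
      rw [flatMap_congr_mem A (fun v => (xs ++ [x]).filter (fun z => key z == v)) (fun v => xs.filter (fun z => key z == v))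
          (fun v hv => by
            show (xs ++ [x]).filter (fun z => key z == v) = xs.filter (fun z => key z == v)
            rw [hbucket' v]; simp [ne_of_gt (hmemA v hv)]),
        flatMap_congr_mem B (fun v => (xs ++ [x]).filter (fun z => key z == v)) (fun v => xs.filter (fun z => key z == v))
          (fun v hv => by
            show (xs ++ [x]).filter (fun z => key z == v) = xs.filter (fun z => key z == v)
            rw [hbucket' v]; simp [ne_of_lt (hmemB v hv)])]
      have hbk : (xs ++ [x]).filter (fun z => key z == k) = [x] := by
        rw [hbucket']
        have h0 : xs.filter (fun z => key z == k) = [] :=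
          List.filter_eq_nil_iff.2 (fun y hy => by
            have : key y ≠ k := fun h => hmem (h ▸ List.mem_map_of_mem hy)
            simpa using this)
        simp [h0]
      rw [hbk, hCnil]
      simp

-- A's vals accumulator is the list of looked-up counts, in key order
theorem fold_fst (key : String → Int) (l : List String) (a : List Int)
    (d : PySem.Dict Int (List String)) :
    (l.foldl (fun (st : List Int × PySem.Dict Int (List String)) item =>
        (st.1 ++ [key item],
         ((if st.2.contains (key item) then st.2 else st.2.insert (key item) []).modify
            (key item) [] (fun l => l ++ [item])))) (a, d)).1 = a ++ l.map key := by
  induction l generalizing a d with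
  | nil => simp
  | cons x t ih => simp [List.foldl_cons, ih]

-- A's inverted dictionary groups each key under its count, in original order
theorem fold_snd (key : String → Int) (l : List String) (a : List Int)
    (d : PySem.Dict Int (List String)) (c : Int) :
    ((l.foldl (fun (st : List Int × PySem.Dict Int (List String)) item =>
        (st.1 ++ [key item],
         ((if st.2.contains (key item) then st.2 else st.2.insert (key item) []).modify
            (key item) [] (fun l => l ++ [item])))) (a, d)).2).getD c []
      = d.getD c [] ++ l.filter (fun k => key k == c) := by
  induction l generalizing a d with
  | nil => simp
  | cons x t ih =>
    rw [List.foldl_cons, ih, List.filter_cons]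
    have hguard : (if d.contains (key x) then d else d.insert (key x) []).getD c []
        = d.getD c [] := by
      by_cases hc : d.contains (key x)
      · simp [hc]
      · rw [if_neg hc, PySem.Dict.getD_insert]
        by_cases hck : c = key x
        · subst hck; rw [PySem.Dict.getD_of_not_contains _ _ (by simpa using hc)]; simp
        · simp [hck]
    rw [PySem.Dict.getD_modify, hguard]
    by_cases hck : c = key x
    · subst hck; simp [hguard]
    · simp [hck, Ne.symm hck]

-- ===== VERDICT (by name: the statement is the Claim_ definition above) =====
theorem bigramSuggest_spec : Claim_equal_bigramSuggest := by
  intro world word invert _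
  unfold Spec_bigramSuggest bigramSuggest bigramSuggest_alt
  cases h : (PySem.Dict.ofList world).get? (PySem.Str.lower word) with
  | none => simp [h]
  | some itemsL =>
    simp only [h]
    set items := PySem.Dict.ofList itemsL with hitems
    set key : String → Int := fun k => (items.get? k).getD 0 with hkey
    have h1 := fold_fst key items.keys [] PySem.Dict.empty
    have h2 := fun c => fold_snd key items.keys [] PySem.Dict.empty c
    simp only [PySem.Dict.getD_empty, List.nil_append] at h1 h2
    rw [h1, PySem.List.foldl_append_eq_flatMap, List.nil_append,
        flatMap_congr_mem _ _ _ (fun v _ => h2 v), ← stable_bucket]
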